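-- pv_equiv track=rewrite | github.com/hubmapconsortium/ubergraph2asct | ubergraph2asct/run.py | generate_columns
-- ===== SOURCE A (Python) =====
-- def generate_columns(nb_terms):
--   header = []
--   for i in range(1, nb_terms):
--     header.append("AS/"+str(i))
--     header.append("AS/"+str(i)+"/LABEL")
--     header.append("AS/"+str(i)+"/ID")
--
--   header.append("CT/1")
--   header.append("CT/1/LABEL")
--   header.append("CT/1/ID")
--
--   return header
-- ===== SOURCE B (Python) =====
-- def generate_columns(nb_terms):
--   prefixes = ["AS/" + str(i) for i in range(1, nb_terms)] + ["CT/1"]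
--   header = []
--   for p in prefixes:
--     header.extend([p, p + "/LABEL", p + "/ID"])
--   return header
-- ===== Notes on version B (the rewrite author's own statement) =====
-- stated objective: alternative
-- what changed: Two-phase decomposition: first build the list of base prefixes (AS/i for i in range, then CT/1), then expand each prefix into its three columns with extend, instead of A's single loop with three appends plus special-cased CT/1 appends.
import Mathlib
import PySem

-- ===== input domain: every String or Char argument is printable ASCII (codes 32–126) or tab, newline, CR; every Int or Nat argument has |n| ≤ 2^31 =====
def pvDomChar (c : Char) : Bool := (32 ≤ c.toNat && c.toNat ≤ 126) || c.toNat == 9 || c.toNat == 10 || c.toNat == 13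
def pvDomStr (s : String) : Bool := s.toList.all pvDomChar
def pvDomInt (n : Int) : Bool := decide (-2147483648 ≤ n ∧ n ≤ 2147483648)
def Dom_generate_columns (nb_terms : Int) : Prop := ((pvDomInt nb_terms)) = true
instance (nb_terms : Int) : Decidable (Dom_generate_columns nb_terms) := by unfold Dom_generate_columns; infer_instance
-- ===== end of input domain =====

-- B builds the header in two phases (prefix list, then expand each prefix into its three columns) instead of A's single loop with special-cased CT/1 appends; same values, an alternative decomposition.
-- ===== PORT A =====
def generate_columns (nb_terms : Int) : List String :=
  let header : List String := []
  let header := (PySem.List.pyRange 1 nb_terms 1).foldl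
    (fun h i => h ++ ["AS/" ++ PySem.Int.toStr i] ++ ["AS/" ++ PySem.Int.toStr i ++ "/LABEL"]
                  ++ ["AS/" ++ PySem.Int.toStr i ++ "/ID"]) header
  header ++ ["CT/1"] ++ ["CT/1/LABEL"] ++ ["CT/1/ID"]

-- ===== PORT B =====
def generate_columns_alt (nb_terms : Int) : List String :=
  let prefixes := (PySem.List.pyRange 1 nb_terms 1).map (fun i => "AS/" ++ PySem.Int.toStr i) ++ ["CT/1"]
  prefixes.foldl (fun h p => h ++ [p, p ++ "/LABEL", p ++ "/ID"]) []

-- ===== PRECONDITION & SPEC =====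
def Spec_generate_columns (nb_terms : Int) (out : List String) : Prop := out = generate_columns_alt nb_terms
instance (nb_terms : Int) (out : List String) : Decidable (Spec_generate_columns nb_terms out) := by unfold Spec_generate_columns; infer_instance

-- ===== CLAIM (what is proved, stated in full; the proofs are below) =====
def Claim_equal_generate_columns : Prop := ∀ (nb_terms : Int), Dom_generate_columns nb_terms → Spec_generate_columns nb_terms (generate_columns nb_terms)

-- ===== LEMMAS AND PROOFS =====

-- ===== VERDICT (by name: the statement is the Claim_ definition above) =====
theorem generate_columns_spec : Claim_equal_generate_columns := by
  intro n _
  unfold Spec_generate_columns generate_columns generate_columns_alt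
  simp only [PySem.List.foldl_append_eq_flatMap, List.nil_append, List.append_assoc,
    List.flatMap_def]
  simp [Function.comp_def]
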